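-- pv_equiv track=rewrite | github.com/demdo/overlay | src/overlay/tools/homography.py | _largest_contiguous_run
-- ===== SOURCE A (Python) =====
-- from typing import Iterable, Tuple, List
--
-- def _largest_contiguous_run(vals_sorted_unique: List[int]) -> Tuple[int, int]:
--     """
--     Return (start, end) of the longest contiguous run
--     in a sorted unique integer list.
--     """
--     if not vals_sorted_unique:
--         raise ValueError("_largest_contiguous_run: empty input")
--
--     best_s = best_e = vals_sorted_unique[0]
--     best_len = 1
--
--     cur_s = cur_e = vals_sorted_unique[0]
--     cur_len = 1
--
--     for v in vals_sorted_unique[1:]: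
--         if v == cur_e + 1:
--             cur_e = v
--             cur_len += 1
--         else:
--             if cur_len > best_len:
--                 best_len = cur_len
--                 best_s, best_e = cur_s, cur_e
--             cur_s = cur_e = v
--             cur_len = 1
--
--     if cur_len > best_len:
--         best_s, best_e = cur_s, cur_e
--
--     return best_s, best_e
-- ===== SOURCE B (Python) =====
-- from typing import Tuple, List
--
-- def _largest_contiguous_run(vals_sorted_unique: List[int]) -> Tuple[int, int]:
--     """
--     Two-phase: group the elements by the key v - i (elements sharing the key
--     with their neighbour form one contiguous run), recording each run as its
--     (first, last) pair, then pick the first longest run.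
--     """
--     if not vals_sorted_unique:
--         raise ValueError("_largest_contiguous_run: empty input")
--
--     runs = []            # list of [first, last] pairs, one per run
--     prev_key = None
--     for i, v in enumerate(vals_sorted_unique):
--         k = v - i
--         if runs and k == prev_key:
--             runs[-1][1] = v          # same key as previous element: extend run
--         else:
--             runs.append([v, v])      # key changed: a new run starts here
--             prev_key = k
--
--     # first longest run wins ties (max keeps the first maximal element);
--     # within a run, last - first is its length minus one
--     best = max(runs, key=lambda r: r[1] - r[0])
--     return best[0], best[1]
-- ===== Notes on version B (the rewrite author's own statement) =====
-- stated objective: alternative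
-- what changed: B is two-phase: it groups elements by the key v - i into explicit (first,last) runs in one pass and then selects the first longest run with max, instead of A's single streaming pass that interleaves run tracking with best/current bookkeeping in six state variables.
import Mathlib
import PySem

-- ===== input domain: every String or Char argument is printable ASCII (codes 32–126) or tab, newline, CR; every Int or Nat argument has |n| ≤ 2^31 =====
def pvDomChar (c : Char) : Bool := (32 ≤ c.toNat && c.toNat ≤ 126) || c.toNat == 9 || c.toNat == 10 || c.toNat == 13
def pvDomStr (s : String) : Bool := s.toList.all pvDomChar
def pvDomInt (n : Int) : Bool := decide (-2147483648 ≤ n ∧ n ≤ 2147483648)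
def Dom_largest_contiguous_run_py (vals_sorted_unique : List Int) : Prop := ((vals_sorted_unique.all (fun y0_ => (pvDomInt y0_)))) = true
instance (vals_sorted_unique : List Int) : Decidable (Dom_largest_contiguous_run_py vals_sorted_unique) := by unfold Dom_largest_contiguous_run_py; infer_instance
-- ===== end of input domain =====

-- B groups elements by the key v - i into explicit (first,last) runs and then selects
-- the first longest run, instead of A's interleaved best/current streaming pass (objective: alternative).

-- ===== PORT A =====
-- state: ((best_s, best_e, best_len), (cur_s, cur_e, cur_len))
def lcrStepA (st : (Int × Int × Int) × (Int × Int × Int)) (v : Int) :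
    (Int × Int × Int) × (Int × Int × Int) :=
  let ((bs, be, bl), (cs, ce, cl)) := st
  if v = ce + 1 then ((bs, be, bl), (cs, v, cl + 1))
  else if cl > bl then ((cs, ce, cl), (v, v, 1))
  else ((bs, be, bl), (v, v, 1))

def largest_contiguous_run_py (vals_sorted_unique : List Int) : Int × Int :=
  match vals_sorted_unique with
  | [] => (0, 0)  -- Python raises ValueError here; excluded by Pre_
  | v0 :: rest =>
    match rest.foldl lcrStepA ((v0, v0, 1), (v0, v0, 1)) with
    | ((bs, be, bl), (cs, ce, cl)) => if cl > bl then (cs, ce) else (bs, be)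

-- ===== PORT B =====
-- enumerate(vals)[i:]
def lcrEnumFrom (i : Int) : List Int → List (Int × Int)
  | [] => []
  | v :: vs => (i, v) :: lcrEnumFrom (i + 1) vs

-- the grouping loop: current run (s, e) with key pk; emits completed (first,last) runs in order
def lcrRuns (s e pk : Int) : List (Int × Int) → List (Int × Int)
  | [] => [(s, e)]
  | (i, v) :: ps =>
    let k := v - i
    if k = pk then lcrRuns s v pk ps
    else (s, e) :: lcrRuns v v k ps

def largest_contiguous_run_py_alt (vals_sorted_unique : List Int) : Int × Int :=
  match vals_sorted_unique with
  | [] => (0, 0)  -- Python raises ValueError here; excluded by Pre_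
  | v0 :: rest =>
    -- first iteration of the loop (runs empty): start run [v0, v0] with key v0 - 0
    match lcrRuns v0 v0 (v0 - 0) (lcrEnumFrom 1 rest) with
    | [] => (0, 0)  -- unreachable: lcrRuns never returns []
    | r :: rs =>
      -- max(runs, key=lambda r: r[1] - r[0]): first maximal run wins
      let best := rs.foldl (fun b c => if c.2 - c.1 > b.2 - b.1 then c else b) r
      (best.1, best.2)

-- ===== PRECONDITION & SPEC =====
-- A raises ValueError on the empty list (and B does too); only that input is excluded.
def Pre_largest_contiguous_run_py (vals_sorted_unique : List Int) : Prop :=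
  vals_sorted_unique ≠ []
instance (vals_sorted_unique : List Int) : Decidable (Pre_largest_contiguous_run_py vals_sorted_unique) := by
  unfold Pre_largest_contiguous_run_py; infer_instance

def pvWitness_largest_contiguous_run_py : List Int := [1, 2, 5, 6, 7]

def Spec_largest_contiguous_run_py (vals_sorted_unique : List Int) (out : Int × Int) : Prop := out = largest_contiguous_run_py_alt vals_sorted_unique
instance (vals_sorted_unique : List Int) (out : Int × Int) : Decidable (Spec_largest_contiguous_run_py vals_sorted_unique out) := by unfold Spec_largest_contiguous_run_py; infer_instance

-- ===== CLAIM (what is proved, stated in full; the proofs are below) =====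
def Claim_equal_largest_contiguous_run_py : Prop := ∀ (vals_sorted_unique : List Int), Dom_largest_contiguous_run_py vals_sorted_unique → Pre_largest_contiguous_run_py vals_sorted_unique → Spec_largest_contiguous_run_py vals_sorted_unique (largest_contiguous_run_py vals_sorted_unique)

-- ===== LEMMAS AND PROOFS =====

-- reference run decomposition: the runs of (s..e) :: vs as (first, last) pairs
def lcrRunsP (s e : Int) : List Int → List (Int × Int)
  | [] => [(s, e)]
  | v :: vs => if v = e + 1 then lcrRunsP s v vs else (s, e) :: lcrRunsP v v vs

def lcrPick (b c : Int × Int) : Int × Int := if c.2 - c.1 > b.2 - b.1 then c else b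

-- B's grouping equals the reference runs: the key test v - i = pk is v = e + 1 when pk = e - i + 1
theorem lcrRuns_eq_runsP (vs : List Int) : ∀ (s e i pk : Int), pk = e - i + 1 →
    lcrRuns s e pk (lcrEnumFrom i vs) = lcrRunsP s e vs := by
  induction vs with
  | nil => intro s e i pk _; simp [lcrRuns, lcrEnumFrom, lcrRunsP]
  | cons v vs ih =>
    intro s e i pk hpk
    simp only [lcrEnumFrom, lcrRuns, lcrRunsP]
    by_cases h : v = e + 1
    · rw [if_pos (by omega), if_pos h, ih s v (i + 1) pk (by omega)]
    · rw [if_neg (by omega), if_neg h, ih v v (i + 1) (v - i) (by omega)]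

-- the first run of lcrRunsP starts at s and ends no earlier than e
theorem lcrRunsP_head (vs : List Int) : ∀ (s e : Int),
    ∃ e' rs, lcrRunsP s e vs = (s, e') :: rs ∧ e ≤ e' := by
  induction vs with
  | nil => intro s e; exact ⟨e, [], rfl, le_refl e⟩
  | cons v vs ih =>
    intro s e
    simp only [lcrRunsP]
    by_cases h : v = e + 1
    · obtain ⟨e', rs, heq, hle⟩ := ih s v
      exact ⟨e', rs, by rw [if_pos h, heq], by omega⟩
    · exact ⟨e, lcrRunsP v v vs, by rw [if_neg h], le_refl e⟩

-- A's fold, finished (the if/projection form the match compiles to), is the pick-fold over the reference runs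
theorem lcrFoldA_eq (rest : List Int) : ∀ (bs be bl cs ce cl : Int),
    bl = be - bs + 1 → cl = ce - cs + 1 →
    (let st := rest.foldl lcrStepA ((bs, be, bl), (cs, ce, cl));
     if st.2.2.2 > st.1.2.2 then (st.2.1, st.2.2.1) else (st.1.1, st.1.2.1))
    = (lcrRunsP cs ce rest).foldl lcrPick (bs, be) := by
  induction rest with
  | nil =>
    intro bs be bl cs ce cl hb hc
    simp only [List.foldl, lcrRunsP, lcrPick]
    by_cases h : cl > bl
    · rw [if_pos h, if_pos (by simp; omega)]
    · rw [if_neg h, if_neg (by simp; omega)]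
  | cons v vs ih =>
    intro bs be bl cs ce cl hb hc
    simp only [List.foldl, lcrStepA, lcrRunsP]
    by_cases h : v = ce + 1
    · rw [if_pos h, if_pos h, ih bs be bl cs v (cl + 1) hb (by omega)]
    · rw [if_neg h, if_neg h]
      by_cases h2 : cl > bl
      · rw [if_pos h2, ih cs ce cl v v 1 hc (by ring)]
        simp only [List.foldl, lcrPick]
        rw [if_pos (by simp; omega)]
      · rw [if_neg h2, ih bs be bl v v 1 hb (by ring)]
        simp only [List.foldl, lcrPick]
        rw [if_neg (by simp; omega)]

-- B's fold body is lcrPick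
theorem lcrFoldB_eq (rs : List (Int × Int)) (r : Int × Int) :
    rs.foldl (fun b c => if c.2 - c.1 > b.2 - b.1 then c else b) r = rs.foldl lcrPick r := rfl

-- ===== VERDICT (by name: the statement is the Claim_ definition above) =====
theorem largest_contiguous_run_py_spec : Claim_equal_largest_contiguous_run_py := by
  intro vals _ hpre
  unfold Spec_largest_contiguous_run_py
  cases vals with
  | nil => exact absurd rfl hpre
  | cons v0 rest =>
    simp only [largest_contiguous_run_py, largest_contiguous_run_py_alt]
    rw [lcrRuns_eq_runsP rest v0 v0 1 (v0 - 0) (by ring)]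
    obtain ⟨e', rs, heq, hle⟩ := lcrRunsP_head rest v0 v0
    rw [heq, lcrFoldA_eq rest v0 v0 1 v0 v0 1 (by ring) (by ring), heq]
    simp only [List.foldl, lcrFoldB_eq]
    have hk : lcrPick (v0, v0) (v0, e') = (v0, e') := by
      unfold lcrPick
      by_cases h : e' - v0 > v0 - v0
      · rw [if_pos h]
      · have : e' = v0 := by omega
        subst this; rw [if_neg h]
    rw [hk]
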